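-- pv_equiv track=rewrite | github.com/Howardkhh/FROSS | Merging/Visualization/visualize3D_texts.py | curvature_seq
-- ===== SOURCE A (Python) =====
-- def curvature_seq(k, base):
--     seq = []
--     m = 2
--     sign = -1  # start bending upward; swap if you prefer
--     while len(seq) < k:
--         seq.append(sign * m * base)
--         sign *= -1
--         if sign == -1:
--             m += 2
--     return seq
-- ===== SOURCE B (Python) =====
-- def curvature_seq(k, base):
--     # staged construction: build the (negative, positive) magnitude pairs,
--     # flatten them, then trim to the requested length k
--     pairs = [(-(2 * j + 2) * base, (2 * j + 2) * base) for j in range((k + 1) // 2)]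
--     flat = [x for p in pairs for x in p]
--     return flat[:k]
-- ===== Notes on version B (the rewrite author's own statement) =====
-- stated objective: alternative
-- what changed: Replaced A's stateful one-pass while-loop (carried sign and magnitude m) by a staged construction: build the list of (negative, positive) magnitude pairs, flatten it, and slice the result to length k.
import Mathlib
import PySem

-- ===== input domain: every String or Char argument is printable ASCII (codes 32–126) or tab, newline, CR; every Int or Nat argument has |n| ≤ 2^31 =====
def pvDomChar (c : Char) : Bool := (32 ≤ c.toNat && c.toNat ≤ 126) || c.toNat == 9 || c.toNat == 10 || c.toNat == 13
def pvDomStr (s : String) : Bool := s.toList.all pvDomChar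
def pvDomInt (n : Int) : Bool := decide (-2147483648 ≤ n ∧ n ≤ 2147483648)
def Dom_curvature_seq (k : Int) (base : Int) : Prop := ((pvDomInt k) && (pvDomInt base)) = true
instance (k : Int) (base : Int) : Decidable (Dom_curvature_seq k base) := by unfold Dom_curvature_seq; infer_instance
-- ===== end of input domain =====

-- B replaces A's stateful while-loop (carried m and sign) by a staged build:
-- (negative, positive) pairs, flattened, then sliced to length k; objective: alternative (same O(k) cost).

-- ===== PORT A =====
-- the while-loop of A: state seq, m, sign; terminates because seq grows each step
def curvatureLoopA (k base : Int) (seq : List Int) (m sign : Int) : List Int :=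
  if _h : (seq.length : Int) < k then
    curvatureLoopA k base (seq ++ [sign * m * base])
      (if -sign = -1 then m + 2 else m) (-sign)
  else seq
termination_by k.toNat - seq.length
decreasing_by simp; omega

def curvature_seq (k : Int) (base : Int) : List Int :=
  curvatureLoopA k base [] 2 (-1)

-- ===== PORT B =====
def curvature_seq_alt (k : Int) (base : Int) : List Int :=
  let pairs := (PySem.List.pyRange 0 (PySem.Int.floordiv (k + 1) 2) 1).map
      (fun j => (-(2 * j + 2) * base, (2 * j + 2) * base))
  let flat := pairs.flatMap (fun p => [p.1, p.2])
  PySem.List.slice flat none (some k)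

-- ===== PRECONDITION & SPEC =====
def Spec_curvature_seq (k : Int) (base : Int) (out : List Int) : Prop := out = curvature_seq_alt k base
instance (k : Int) (base : Int) (out : List Int) : Decidable (Spec_curvature_seq k base out) := by unfold Spec_curvature_seq; infer_instance

-- ===== CLAIM =====
def Claim_equal_curvature_seq : Prop := ∀ (k : Int) (base : Int), Dom_curvature_seq k base → Spec_curvature_seq k base (curvature_seq k base)

-- ===== LEMMAS AND PROOFS =====

-- canonical element formula used to relate both ports
def pvElem (base : Int) (j : Nat) : Int :=
  (if j % 2 = 0 then (-1 : Int) else 1) * (2 * ((j / 2 : Nat) : Int) + 2) * base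

lemma loopA_eq (k base : Int) :
    ∀ (d n : Nat), n ≤ k.toNat → k.toNat - n = d →
      curvatureLoopA k base ((List.range n).map (pvElem base))
        (2 * ((n / 2 : Nat) : Int) + 2) (if n % 2 = 0 then (-1 : Int) else 1)
      = (List.range k.toNat).map (pvElem base) := by
  intro d
  induction d with
  | zero =>
    intro n hn hd
    have hnk : n = k.toNat := by omega
    subst hnk
    rw [curvatureLoopA]
    have h0 : ¬ ((((List.range k.toNat).map (pvElem base)).length : Int) < k) := by
      simp
    rw [dif_neg h0]
  | succ d ih =>
    intro n hn hd
    have hlt : n < k.toNat := by omega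
    rw [curvatureLoopA]
    have hc : ((((List.range n).map (pvElem base)).length : Int) < k) := by
      simp; omega
    rw [dif_pos hc]
    have happ : (List.range n).map (pvElem base) ++
        [(if n % 2 = 0 then (-1 : Int) else 1) * (2 * ((n / 2 : Nat) : Int) + 2) * base]
        = (List.range (n + 1)).map (pvElem base) := by
      rw [List.range_succ, List.map_append]
      simp [pvElem]
    have hm : (if -(if n % 2 = 0 then (-1 : Int) else 1) = -1
          then 2 * ((n / 2 : Nat) : Int) + 2 + 2 else 2 * ((n / 2 : Nat) : Int) + 2)
        = 2 * (((n + 1) / 2 : Nat) : Int) + 2 := by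
      by_cases hj : n % 2 = 0
      · have : (n + 1) / 2 = n / 2 := by omega
        simp [hj, this]
      · have : (n + 1) / 2 = n / 2 + 1 := by omega
        simp [hj, this]
        ring
    have hs : -(if n % 2 = 0 then (-1 : Int) else 1)
        = (if (n + 1) % 2 = 0 then (-1 : Int) else 1) := by
      by_cases hj : n % 2 = 0
      · have : (n + 1) % 2 = 1 := by omega
        simp [hj, this]
      · have : (n + 1) % 2 = 0 := by omega
        simp [hj, this]
    rw [happ, hm, hs]
    exact ih (n + 1) (by omega) (by omega)

-- flattening the pair list gives the canonical element sequence of even length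
lemma pairsFlat (base : Int) : ∀ (N : Nat),
    ((List.range N).map (fun j : Nat =>
      [-(2 * (j : Int) + 2) * base, (2 * (j : Int) + 2) * base])).flatten
    = (List.range (2 * N)).map (pvElem base) := by
  intro N
  induction N with
  | zero => simp
  | succ N ih =>
    rw [List.range_succ, List.map_append, List.flatten_append, ih]
    have h2 : 2 * (N + 1) = (2 * N + 1) + 1 := by omega
    rw [h2, List.range_succ, List.map_append, List.range_succ, List.map_append,
      List.append_assoc]
    congr 1
    have e1 : pvElem base (2 * N) = -(2 * (N : Int) + 2) * base := by
      unfold pvElem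
      have : 2 * N % 2 = 0 := by omega
      have h' : 2 * N / 2 = N := by omega
      simp [this, h']
    have e2 : pvElem base (2 * N + 1) = (2 * (N : Int) + 2) * base := by
      unfold pvElem
      have : (2 * N + 1) % 2 = 1 := by omega
      have h' : (2 * N + 1) / 2 = N := by omega
      simp [this, h']
    simp [e1, e2]

lemma alt_eq (k base : Int) :
    curvature_seq_alt k base = (List.range k.toNat).map (pvElem base) := by
  unfold curvature_seq_alt
  dsimp only
  have hfd : PySem.Int.floordiv (k + 1) 2 = (k + 1) / 2 := by
    simp [PySem.Int.floordiv, Int.fdiv_eq_ediv]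
  by_cases hk : k ≤ 0
  · have hn : (k + 1) / 2 ≤ 0 := by omega
    have hk0 : k.toNat = 0 := by omega
    rw [hfd, PySem.List.pyRange_one_eq_nil hn, hk0]
    simp [PySem.List.slice]
  · set N : Nat := ((k + 1) / 2).toNat with hNdef
    have hN : (k + 1) / 2 = (N : Int) := by omega
    rw [hfd, hN, PySem.List.pyRange_one]
    have hT : ((N : Int) - 0).toNat = N := by omega
    rw [hT]
    rw [List.map_map, List.flatMap_def, List.map_map]
    have hfun : ((fun p : Int × Int => [p.1, p.2]) ∘
        ((fun j => (-(2 * j + 2) * base, (2 * j + 2) * base)) ∘ fun j : Nat => (0 : Int) + ↑j))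
        = fun j : Nat => [-(2 * (j : Int) + 2) * base, (2 * (j : Int) + 2) * base] := by
      funext j; simp
    rw [hfun, pairsFlat]
    have hknn : (0 : Int) ≤ k := by omega
    rw [PySem.List.slice_to _ hknn]
    rw [← List.map_take, List.take_range]
    have : min k.toNat (2 * N) = k.toNat := by omega
    rw [this]

-- ===== VERDICT =====
theorem curvature_seq_spec : Claim_equal_curvature_seq := by
  intro k base _
  unfold Spec_curvature_seq curvature_seq
  rw [alt_eq]
  have := loopA_eq k base k.toNat 0 (by omega) (by omega)
  simpa using this
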